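-- pv_equiv track=rewrite | github.com/SgSc733/disc_grading_project-small_sample-version | src/data_utils.py | group_features_by_type
-- ===== SOURCE A (Python) =====
-- def group_features_by_type(feature_columns):
--
--     shape_cols = [col for col in feature_columns if col.startswith('shape_')]
--     firstorder_cols = [col for col in feature_columns if col.startswith('firstorder_')]
--     glcm_cols = [col for col in feature_columns if col.startswith('glcm_')]
--     gldm_cols = [col for col in feature_columns if col.startswith('gldm_')]
--     glrlm_cols = [col for col in feature_columns if col.startswith('glrlm_')]
--     glszm_cols = [col for col in feature_columns if col.startswith('glszm_')]
--     ngtdm_cols = [col for col in feature_columns if col.startswith('ngtdm_')]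
--
--     texture_cols = glcm_cols + gldm_cols + glrlm_cols + glszm_cols + ngtdm_cols
--
--     return {
--         'shape': shape_cols,
--         'firstorder': firstorder_cols,
--         'texture': texture_cols,
--         'all': feature_columns
--     }
-- ===== SOURCE B (Python) =====
-- def group_features_by_type(feature_columns):
--     shape, firstorder, glcm, gldm, glrlm, glszm, ngtdm = [], [], [], [], [], [], []
--     for col in feature_columns:
--         if col.startswith('shape_'):
--             shape.append(col)
--         elif col.startswith('firstorder_'):
--             firstorder.append(col)
--         elif col.startswith('glcm_'):
--             glcm.append(col)
--         elif col.startswith('gldm_'):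
--             gldm.append(col)
--         elif col.startswith('glrlm_'):
--             glrlm.append(col)
--         elif col.startswith('glszm_'):
--             glszm.append(col)
--         elif col.startswith('ngtdm_'):
--             ngtdm.append(col)
--     return {
--         'shape': shape,
--         'firstorder': firstorder,
--         'texture': glcm + gldm + glrlm + glszm + ngtdm,
--         'all': feature_columns,
--     }
-- ===== Notes on version B (the rewrite author's own statement) =====
-- stated objective: alternative
-- what changed: Replaces seven full scans of feature_columns (one filter per prefix) by a single traversal that dispatches each column into one of seven buckets via an if/elif prefix chain, then concatenates the five texture buckets in the fixed glcm,gldm,glrlm,glszm,ngtdm order.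
import Mathlib
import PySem

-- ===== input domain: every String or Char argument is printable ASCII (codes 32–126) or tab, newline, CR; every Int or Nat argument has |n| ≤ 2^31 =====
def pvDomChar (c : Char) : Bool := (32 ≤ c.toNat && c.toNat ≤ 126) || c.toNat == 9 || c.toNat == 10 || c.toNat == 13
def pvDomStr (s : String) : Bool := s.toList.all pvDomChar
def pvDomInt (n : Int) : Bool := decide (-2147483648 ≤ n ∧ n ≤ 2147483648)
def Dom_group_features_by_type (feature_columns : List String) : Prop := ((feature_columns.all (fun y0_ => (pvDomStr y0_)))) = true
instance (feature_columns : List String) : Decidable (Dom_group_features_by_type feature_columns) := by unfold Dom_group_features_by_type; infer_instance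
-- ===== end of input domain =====

-- B replaces A's seven full scans (one filter per prefix) by a single traversal that
-- dispatches each column into one of seven buckets via an if/elif prefix chain (objective: alternative algorithm).

-- ===== PORT A =====
def group_features_by_type (feature_columns : List String) : List (String × List String) :=
  let shape_cols := feature_columns.filter (fun col => PySem.Str.startswith col "shape_")
  let firstorder_cols := feature_columns.filter (fun col => PySem.Str.startswith col "firstorder_")
  let glcm_cols := feature_columns.filter (fun col => PySem.Str.startswith col "glcm_")
  let gldm_cols := feature_columns.filter (fun col => PySem.Str.startswith col "gldm_")
  let glrlm_cols := feature_columns.filter (fun col => PySem.Str.startswith col "glrlm_")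
  let glszm_cols := feature_columns.filter (fun col => PySem.Str.startswith col "glszm_")
  let ngtdm_cols := feature_columns.filter (fun col => PySem.Str.startswith col "ngtdm_")
  let texture_cols := glcm_cols ++ gldm_cols ++ glrlm_cols ++ glszm_cols ++ ngtdm_cols
  [("shape", shape_cols), ("firstorder", firstorder_cols), ("texture", texture_cols), ("all", feature_columns)]

-- ===== PORT B =====
-- one pass: the loop body of Source B as a fold step over the 7-bucket state
def gfbtStep (st : List String × List String × List String × List String × List String × List String × List String)
    (col : String) : List String × List String × List String × List String × List String × List String × List String :=
  let (s, f, c, d, r, z, n) := st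
  if PySem.Str.startswith col "shape_" then (s ++ [col], f, c, d, r, z, n)
  else if PySem.Str.startswith col "firstorder_" then (s, f ++ [col], c, d, r, z, n)
  else if PySem.Str.startswith col "glcm_" then (s, f, c ++ [col], d, r, z, n)
  else if PySem.Str.startswith col "gldm_" then (s, f, c, d ++ [col], r, z, n)
  else if PySem.Str.startswith col "glrlm_" then (s, f, c, d, r ++ [col], z, n)
  else if PySem.Str.startswith col "glszm_" then (s, f, c, d, r, z ++ [col], n)
  else if PySem.Str.startswith col "ngtdm_" then (s, f, c, d, r, z, n ++ [col])
  else (s, f, c, d, r, z, n)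

def group_features_by_type_alt (feature_columns : List String) : List (String × List String) :=
  let (s, f, c, d, r, z, n) := feature_columns.foldl gfbtStep ([], [], [], [], [], [], [])
  [("shape", s), ("firstorder", f), ("texture", c ++ d ++ r ++ z ++ n), ("all", feature_columns)]

-- ===== PRECONDITION & SPEC =====
def Spec_group_features_by_type (feature_columns : List String) (out : List (String × List String)) : Prop := out = group_features_by_type_alt feature_columns
instance (feature_columns : List String) (out : List (String × List String)) : Decidable (Spec_group_features_by_type feature_columns out) := by unfold Spec_group_features_by_type; infer_instance

-- ===== CLAIM (what is proved, stated in full; the proofs are below) =====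
def Claim_equal_group_features_by_type : Prop := ∀ (feature_columns : List String), Dom_group_features_by_type feature_columns → Spec_group_features_by_type feature_columns (group_features_by_type feature_columns)

-- ===== LEMMAS AND PROOFS =====

-- no string starts with two incomparable prefixes
theorem gfbt_sw_excl (p q : List Char) (h1 : ¬ p <+: q) (h2 : ¬ q <+: p) (s : List Char)
    (hp : PySem.Chars.startswith s p = true) : PySem.Chars.startswith s q = false := by
  by_contra h
  have hq : PySem.Chars.startswith s q = true := by
    cases hb : PySem.Chars.startswith s q with
    | true => rfl
    | false => exact absurd hb h
  have hp' : p <+: s := (PySem.Chars.startswith_iff _ _).mp hp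
  have hq' : q <+: s := (PySem.Chars.startswith_iff _ _).mp hq
  rcases List.prefix_or_prefix_of_prefix hp' hq' with hc | hc
  · exact h1 hc
  · exact h2 hc

theorem gfbt_loop (l : List String) (s f c d r z n : List String) :
    l.foldl gfbtStep (s, f, c, d, r, z, n) =
      (s ++ l.filter (fun col => PySem.Str.startswith col "shape_"),
       f ++ l.filter (fun col => PySem.Str.startswith col "firstorder_"),
       c ++ l.filter (fun col => PySem.Str.startswith col "glcm_"),
       d ++ l.filter (fun col => PySem.Str.startswith col "gldm_"),
       r ++ l.filter (fun col => PySem.Str.startswith col "glrlm_"),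
       z ++ l.filter (fun col => PySem.Str.startswith col "glszm_"),
       n ++ l.filter (fun col => PySem.Str.startswith col "ngtdm_")) := by
  induction l generalizing s f c d r z n with
  | nil => simp
  | cons x xs ih =>
    by_cases h1 : PySem.Chars.startswith x.toList ['s', 'h', 'a', 'p', 'e', '_'] = true
    · have e2 := gfbt_sw_excl ['s', 'h', 'a', 'p', 'e', '_'] ['f', 'i', 'r', 's', 't', 'o', 'r', 'd', 'e', 'r', '_'] (by decide) (by decide) x.toList h1
      have e3 := gfbt_sw_excl ['s', 'h', 'a', 'p', 'e', '_'] ['g', 'l', 'c', 'm', '_'] (by decide) (by decide) x.toList h1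
      have e4 := gfbt_sw_excl ['s', 'h', 'a', 'p', 'e', '_'] ['g', 'l', 'd', 'm', '_'] (by decide) (by decide) x.toList h1
      have e5 := gfbt_sw_excl ['s', 'h', 'a', 'p', 'e', '_'] ['g', 'l', 'r', 'l', 'm', '_'] (by decide) (by decide) x.toList h1
      have e6 := gfbt_sw_excl ['s', 'h', 'a', 'p', 'e', '_'] ['g', 'l', 's', 'z', 'm', '_'] (by decide) (by decide) x.toList h1
      have e7 := gfbt_sw_excl ['s', 'h', 'a', 'p', 'e', '_'] ['n', 'g', 't', 'd', 'm', '_'] (by decide) (by decide) x.toList h1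
      simp [gfbtStep, List.filter_cons, h1, e2, e3, e4, e5, e6, e7, ih]
    ·
      by_cases h2 : PySem.Chars.startswith x.toList ['f', 'i', 'r', 's', 't', 'o', 'r', 'd', 'e', 'r', '_'] = true
      · have e3 := gfbt_sw_excl ['f', 'i', 'r', 's', 't', 'o', 'r', 'd', 'e', 'r', '_'] ['g', 'l', 'c', 'm', '_'] (by decide) (by decide) x.toList h2
        have e4 := gfbt_sw_excl ['f', 'i', 'r', 's', 't', 'o', 'r', 'd', 'e', 'r', '_'] ['g', 'l', 'd', 'm', '_'] (by decide) (by decide) x.toList h2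
        have e5 := gfbt_sw_excl ['f', 'i', 'r', 's', 't', 'o', 'r', 'd', 'e', 'r', '_'] ['g', 'l', 'r', 'l', 'm', '_'] (by decide) (by decide) x.toList h2
        have e6 := gfbt_sw_excl ['f', 'i', 'r', 's', 't', 'o', 'r', 'd', 'e', 'r', '_'] ['g', 'l', 's', 'z', 'm', '_'] (by decide) (by decide) x.toList h2
        have e7 := gfbt_sw_excl ['f', 'i', 'r', 's', 't', 'o', 'r', 'd', 'e', 'r', '_'] ['n', 'g', 't', 'd', 'm', '_'] (by decide) (by decide) x.toList h2
        simp [gfbtStep, List.filter_cons, h1, h2, e3, e4, e5, e6, e7, ih]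
      ·
        by_cases h3 : PySem.Chars.startswith x.toList ['g', 'l', 'c', 'm', '_'] = true
        · have e4 := gfbt_sw_excl ['g', 'l', 'c', 'm', '_'] ['g', 'l', 'd', 'm', '_'] (by decide) (by decide) x.toList h3
          have e5 := gfbt_sw_excl ['g', 'l', 'c', 'm', '_'] ['g', 'l', 'r', 'l', 'm', '_'] (by decide) (by decide) x.toList h3
          have e6 := gfbt_sw_excl ['g', 'l', 'c', 'm', '_'] ['g', 'l', 's', 'z', 'm', '_'] (by decide) (by decide) x.toList h3
          have e7 := gfbt_sw_excl ['g', 'l', 'c', 'm', '_'] ['n', 'g', 't', 'd', 'm', '_'] (by decide) (by decide) x.toList h3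
          simp [gfbtStep, List.filter_cons, h1, h2, h3, e4, e5, e6, e7, ih]
        ·
          by_cases h4 : PySem.Chars.startswith x.toList ['g', 'l', 'd', 'm', '_'] = true
          · have e5 := gfbt_sw_excl ['g', 'l', 'd', 'm', '_'] ['g', 'l', 'r', 'l', 'm', '_'] (by decide) (by decide) x.toList h4
            have e6 := gfbt_sw_excl ['g', 'l', 'd', 'm', '_'] ['g', 'l', 's', 'z', 'm', '_'] (by decide) (by decide) x.toList h4
            have e7 := gfbt_sw_excl ['g', 'l', 'd', 'm', '_'] ['n', 'g', 't', 'd', 'm', '_'] (by decide) (by decide) x.toList h4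
            simp [gfbtStep, List.filter_cons, h1, h2, h3, h4, e5, e6, e7, ih]
          ·
            by_cases h5 : PySem.Chars.startswith x.toList ['g', 'l', 'r', 'l', 'm', '_'] = true
            · have e6 := gfbt_sw_excl ['g', 'l', 'r', 'l', 'm', '_'] ['g', 'l', 's', 'z', 'm', '_'] (by decide) (by decide) x.toList h5
              have e7 := gfbt_sw_excl ['g', 'l', 'r', 'l', 'm', '_'] ['n', 'g', 't', 'd', 'm', '_'] (by decide) (by decide) x.toList h5
              simp [gfbtStep, List.filter_cons, h1, h2, h3, h4, h5, e6, e7, ih]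
            ·
              by_cases h6 : PySem.Chars.startswith x.toList ['g', 'l', 's', 'z', 'm', '_'] = true
              · have e7 := gfbt_sw_excl ['g', 'l', 's', 'z', 'm', '_'] ['n', 'g', 't', 'd', 'm', '_'] (by decide) (by decide) x.toList h6
                simp [gfbtStep, List.filter_cons, h1, h2, h3, h4, h5, h6, e7, ih]
              ·
                by_cases h7 : PySem.Chars.startswith x.toList ['n', 'g', 't', 'd', 'm', '_'] = true
                · simp [gfbtStep, List.filter_cons, h1, h2, h3, h4, h5, h6, h7, ih]
                ·
                  · simp [gfbtStep, List.filter_cons, h1, h2, h3, h4, h5, h6, h7, ih]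

-- ===== VERDICT (by name: the statement is the Claim_ definition above) =====
theorem group_features_by_type_spec : Claim_equal_group_features_by_type := by
  intro fc _
  unfold Spec_group_features_by_type group_features_by_type group_features_by_type_alt
  rw [gfbt_loop]
  simp
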